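-- pv_equiv track=rewrite | github.com/DM-09/Baekjoon | 전체 문제/Bronze II/27494.py | check
-- ===== SOURCE A (Python) =====
-- lottery = ['2', '0', '2', '3']
--
-- def check(n):
--     strn = str(n)
--     index = 0
--     for num in strn:
--         if num == lottery[index]:
--             index += 1
--             if index == 4:
--                 return True
--     return False
-- ===== SOURCE B (Python) =====
-- def check(n):
--     s = str(n)
--     pos = -1
--     for c in '2023':
--         pos = s.find(c, pos + 1)
--         if pos == -1:
--             return False
--     return True
-- ===== Notes on version B (the rewrite author's own statement) =====
-- stated objective: idiomatic
-- what changed: B loops over the four pattern characters using str.find with a moving cursor instead of A's loop over the digits of n with a pattern index.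
import Mathlib
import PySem

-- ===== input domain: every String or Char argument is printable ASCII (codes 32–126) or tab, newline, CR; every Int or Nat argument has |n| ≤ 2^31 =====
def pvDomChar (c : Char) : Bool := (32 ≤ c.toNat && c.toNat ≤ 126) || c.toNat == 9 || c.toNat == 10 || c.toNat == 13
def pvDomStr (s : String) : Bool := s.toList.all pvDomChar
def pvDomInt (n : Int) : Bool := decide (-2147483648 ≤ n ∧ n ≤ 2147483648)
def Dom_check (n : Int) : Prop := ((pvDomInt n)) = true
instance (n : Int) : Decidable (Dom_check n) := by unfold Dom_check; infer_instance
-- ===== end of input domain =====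

-- B scans for the four pattern characters of '2023' with str.find and a moving cursor, instead of
-- A's digit-by-digit loop carrying a pattern index; same cost, more idiomatic.

-- ===== PORT A =====
def lottery : List Char := ['2', '0', '2', '3']

-- A's for-loop with early return; lottery[index] via getD (index stays < 4 on every run)
def checkGo : List Char → Nat → Bool
  | [], _ => false
  | num :: rest, index =>
    if num == lottery.getD index ' ' then
      if index + 1 == 4 then true
      else checkGo rest (index + 1)
    else checkGo rest index

def check (n : Int) : Bool := checkGo (PySem.Int.toStr n).toList 0

-- ===== PORT B =====
-- B's for-loop over the pattern '2023': pos = s.find(c, pos + 1); early False on -1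
def checkAltGo (s : String) : List Char → Int → Bool
  | [], _ => true
  | c :: cs, pos =>
    let j := PySem.Str.findFrom s (String.ofList [c]) (pos + 1) none
    if j == -1 then false else checkAltGo s cs j

def check_alt (n : Int) : Bool := checkAltGo (PySem.Int.toStr n) "2023".toList (-1)

-- ===== PRECONDITION & SPEC =====
def Spec_check (n : Int) (out : Bool) : Prop := out = check_alt n
instance (n : Int) (out : Bool) : Decidable (Spec_check n out) := by unfold Spec_check; infer_instance

-- ===== CLAIM (what is proved, stated in full; the proofs are below) =====
def Claim_equal_check : Prop := ∀ (n : Int), Dom_check n → Spec_check n (check n)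

-- ===== LEMMAS AND PROOFS =====

theorem cons_sublist_cons_of_ne {p c : Char} {ps cs : List Char} (h : c ≠ p) :
    (List.Sublist (p :: ps) (c :: cs)) ↔ (List.Sublist (p :: ps) cs) := by
  constructor
  · intro hs
    cases hs with
    | cons _ h' => exact h'
    | cons₂ => exact absurd rfl h
  · intro hs; exact hs.cons c

-- greedy matching: matching the pattern head at its FIRST occurrence is complete
theorem greedy_cons {p : Char} (ps t1 t2 : List Char) (hp : p ∉ t1) :
    (List.Sublist (p :: ps) (t1 ++ p :: t2)) ↔ List.Sublist ps t2 := by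
  induction t1 with
  | nil =>
    constructor
    · intro h
      cases h with
      | cons _ h' => exact (List.sublist_cons_self p ps).trans h'
      | cons₂ => assumption
    · intro h; exact h.cons₂ p
  | cons c t1 ih =>
    have hc : c ≠ p := fun hcp => hp (hcp ▸ List.mem_cons_self)
    rw [List.cons_append, cons_sublist_cons_of_ne hc]
    exact ih (fun hm => hp (List.mem_cons_of_mem _ hm))

theorem lottery_drop (i : Nat) (hi : i < 4) :
    lottery.drop i = lottery.getD i ' ' :: lottery.drop (i + 1) := by
  interval_cases i <;> rfl

-- A's scan computes the subsequence predicate for the remaining pattern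
theorem checkGo_eq : ∀ (cs : List Char) (i : Nat), i < 4 →
    checkGo cs i = decide (List.Sublist (lottery.drop i) cs) := by
  intro cs
  induction cs with
  | nil =>
    intro i hi
    interval_cases i <;> simp [checkGo, lottery]
  | cons c cs ih =>
    intro i hi
    by_cases hc : c = lottery.getD i ' '
    · by_cases h4 : i + 1 = 4
      · have hone : List.drop i lottery = [c] := by
          rw [lottery_drop i hi, show i + 1 = 4 from h4, hc]; rfl
        rw [hone]
        simp [checkGo, hc, h4]
      · have hlt : i + 1 < 4 := lt_of_le_of_ne hi h4
        have h4' : i ≠ 3 := by omega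
        have hstep : checkGo (c :: cs) i = checkGo cs (i + 1) := by
          simp [checkGo, hc, h4']
        rw [hstep, ih (i + 1) hlt, lottery_drop i hi, ← hc, decide_eq_decide]
        exact (List.cons_sublist_cons).symm
    · have hc' : ¬ c = lottery[i]?.getD ' ' := by simpa [List.getD] using hc
      have hstep : checkGo (c :: cs) i = checkGo cs i := by
        simp [checkGo, hc']
      rw [hstep, ih i hi, lottery_drop i hi, decide_eq_decide]
      exact (cons_sublist_cons_of_ne hc).symm

-- B's cursor scan computes the same subsequence predicate on suffixes
theorem checkAltGo_eq (s : String) : ∀ (ps : List Char) (k : Nat), k ≤ s.toList.length →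
    checkAltGo s ps ((k : Int) - 1) = decide (List.Sublist ps (s.toList.drop k)) := by
  intro ps
  induction ps with
  | nil => intro k hk; simp [checkAltGo]
  | cons c cs ih =>
    intro k hk
    rw [checkAltGo]
    have e1 : (k : Int) - 1 + 1 = (k : Int) := by ring
    rw [e1]
    rw [PySem.Str.findFrom_eq]
    have hcl : (String.ofList [c]).toList = [c] := by simp
    rw [hcl]
    rw [PySem.Chars.findFrom_natCast _ _ k hk]
    by_cases h0 : PySem.Chars.find (s.toList.drop k) [c] = -1
    · rw [if_pos h0]
      have hnotmem : c ∉ s.toList.drop k := by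
        intro hmem
        apply (PySem.Chars.find_eq_neg_one_iff _ _).mp h0
        obtain ⟨u, v, huv⟩ := List.mem_iff_append.mp hmem
        exact ⟨u, v, by rw [huv]; simp⟩
      have hns : ¬ List.Sublist (c :: cs) (s.toList.drop k) := fun h =>
        hnotmem (h.subset List.mem_cons_self)
      simp [hns]
    · have hge : 0 ≤ PySem.Chars.find (s.toList.drop k) [c] := by
        have := PySem.Chars.neg_one_le_find (s.toList.drop k) [c]
        omega
      obtain ⟨hpre, hmin⟩ := PySem.Chars.find_spec hge
      set m : Int := PySem.Chars.find (s.toList.drop k) [c] with hm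
      set M : Nat := m.toNat with hM
      have hmM : m = (M : Int) := (Int.toNat_of_nonneg hge).symm
      rw [if_neg h0]
      have hdd : (s.toList.drop k).drop M = s.toList.drop (k + M) := by
        rw [List.drop_drop]
      have hcons : s.toList.drop (k + M) = c :: s.toList.drop (k + M + 1) := by
        obtain ⟨t, ht⟩ := hpre
        rw [hdd] at ht
        have htail : (s.toList.drop (k + M)).tail = s.toList.drop (k + M + 1) := by
          rw [List.tail_drop]
        rw [← ht]
        rw [← ht] at htail
        simp only [List.singleton_append, List.tail_cons] at htail
        rw [htail, List.singleton_append]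
      have hlen : k + M + 1 ≤ s.toList.length := by
        by_contra hgt
        have : s.toList.drop (k + M) = [] := List.drop_eq_nil_of_le (by omega)
        rw [hcons] at this
        exact List.cons_ne_nil _ _ this
      have hjeq : (k : Int) + m = ((k + M + 1 : Nat) : Int) - 1 := by
        rw [hmM]; push_cast; ring
      have hne : ((if ((k : Int) + m == -1) = true then false else
          checkAltGo s cs ((k : Int) + m)) = checkAltGo s cs ((k : Int) + m)) := by
        rw [if_neg (by simp; omega)]
      rw [hne, hjeq, ih (k + M + 1) hlen, decide_eq_decide]
      have hdecomp : s.toList.drop k =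
          (s.toList.drop k).take M ++ c :: s.toList.drop (k + M + 1) := by
        conv_lhs => rw [← List.take_append_drop M (s.toList.drop k)]
        rw [hdd, hcons]
      have hnottake : c ∉ (s.toList.drop k).take M := by
        intro hmem
        obtain ⟨i, hilen, hget⟩ := List.getElem_of_mem hmem
        rw [List.length_take] at hilen
        have hiM : i < M := by omega
        have hil : i < (s.toList.drop k).length := by omega
        have hgeti : (s.toList.drop k)[i] = c := by
          rw [← hget, List.getElem_take]
        apply hmin i (by omega)
        exact ⟨(s.toList.drop k).drop (i + 1), by
          rw [List.drop_eq_getElem_cons hil, hgeti]; rfl⟩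
      conv_rhs => rw [hdecomp]
      exact (greedy_cons cs _ _ hnottake).symm

-- ===== VERDICT (by name: the statement is the Claim_ definition above) =====
theorem check_spec : Claim_equal_check := by
  intro n _
  unfold Spec_check check check_alt
  rw [checkGo_eq _ 0 (by norm_num)]
  have := checkAltGo_eq (PySem.Int.toStr n) "2023".toList 0 (Nat.zero_le _)
  norm_num at this
  rw [this, List.drop_zero, PySem.Int.toList_toStr]
  have hl : lottery = "2023".toList := by decide
  rw [hl]
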